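-- pv_equiv track=rewrite | github.com/chbrooks/CS662F21HW2 | NurseSchedulingProblem.py | getShifts
-- ===== SOURCE A (Python) =====
-- numNurses = 3
--
-- numShifts = 3
--
-- def getShifts(bitstring) :
--     nlist = []
--     for i in range(numShifts) :
--         shift = []
--         for j in range(numNurses) :
--             shift.append(bitstring[(j*numShifts) +i])
--         nlist.append(shift)
--     return nlist
-- ===== SOURCE B (Python) =====
-- numNurses = 3
--
-- numShifts = 3
--
-- # B: one pass over the flat bitstring, distributing each element into the
-- # bucket for its shift (idx % numShifts), instead of A's nested shift-major loops.
-- def getShifts(bitstring):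
--     nlist = [[] for _ in range(numShifts)]
--     for idx in range(numNurses * numShifts):
--         nlist[idx % numShifts].append(bitstring[idx])
--     return nlist
-- ===== Notes on version B (the rewrite author's own statement) =====
-- stated objective: alternative
-- what changed: A emits each shift with a nested shift-major double loop of strided reads; B makes a single linear pass over the flat bitstring, distributing each element into the bucket idx % numShifts.
import Mathlib
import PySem

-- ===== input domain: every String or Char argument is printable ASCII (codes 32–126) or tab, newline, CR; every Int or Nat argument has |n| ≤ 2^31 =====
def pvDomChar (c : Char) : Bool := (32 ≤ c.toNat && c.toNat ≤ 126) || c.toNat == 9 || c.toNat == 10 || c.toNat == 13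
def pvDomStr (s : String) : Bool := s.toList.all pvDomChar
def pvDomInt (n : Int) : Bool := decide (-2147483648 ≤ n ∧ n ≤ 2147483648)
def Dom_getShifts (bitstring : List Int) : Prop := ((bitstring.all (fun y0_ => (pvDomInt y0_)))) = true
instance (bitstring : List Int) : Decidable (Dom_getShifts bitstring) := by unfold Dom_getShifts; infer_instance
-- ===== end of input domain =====

-- B replaces A's nested shift-major double loop with one linear pass that
-- distributes bitstring[idx] into bucket idx % numShifts; same return values on Pre_ (length ≥ 9).

-- ===== PORT A =====
-- A: for i in range(3): shift = []; for j in range(3): shift.append(bitstring[j*3+i]); nlist.append(shift)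
def getShifts (bitstring : List Int) : List (List Int) :=
  (PySem.List.pyRange 0 3 1).foldl (fun nlist i =>
    nlist ++ [(PySem.List.pyRange 0 3 1).foldl (fun shift j =>
      shift ++ [(PySem.List.pyGet? bitstring (j * 3 + i)).getD 0]) []]) []

-- ===== PORT B =====
-- B: nlist = [[],[],[]]; for idx in range(9): nlist[idx % 3].append(bitstring[idx])
def getShifts_alt (bitstring : List Int) : List (List Int) :=
  (PySem.List.pyRange 0 9 1).foldl (fun nlist idx =>
    let b := (PySem.Int.mod idx 3).toNat
    nlist.set b ((nlist.getD b []) ++ [(PySem.List.pyGet? bitstring idx).getD 0]))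
    [[], [], []]

-- ===== PRECONDITION & SPEC =====
-- Pre_: both programs raise IndexError when fewer than 9 bits are given (index 8 is read)
def Pre_getShifts (bitstring : List Int) : Prop := 9 ≤ bitstring.length
instance (bitstring : List Int) : Decidable (Pre_getShifts bitstring) := by unfold Pre_getShifts; infer_instance
def pvWitness_getShifts : List Int := [1, 0, 1, 0, 1, 0, 1, 1, 0]

def Spec_getShifts (bitstring : List Int) (out : List (List Int)) : Prop := out = getShifts_alt bitstring
instance (bitstring : List Int) (out : List (List Int)) : Decidable (Spec_getShifts bitstring out) := by unfold Spec_getShifts; infer_instance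

-- ===== CLAIM (what is proved, stated in full; the proofs are below) =====
def Claim_equal_getShifts : Prop := ∀ (bitstring : List Int), Dom_getShifts bitstring → Pre_getShifts bitstring → Spec_getShifts bitstring (getShifts bitstring)

-- ===== LEMMAS AND PROOFS =====

theorem getShifts_agree (bitstring : List Int) (h : 9 ≤ bitstring.length) :
    getShifts bitstring = getShifts_alt bitstring := by
  match bitstring, h with
  | a :: b :: c :: d :: e :: f :: g :: h' :: i :: rest, _ =>
    simp [getShifts, getShifts_alt, PySem.List.pyRange, PySem.List.pyGet?,
      PySem.List.pyIdx?, PySem.Int.mod, List.range_succ]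

-- ===== VERDICT (by name: the statement is the Claim_ definition above) =====
theorem getShifts_spec : Claim_equal_getShifts := by
  intro bs _ hpre
  exact getShifts_agree bs hpre
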